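-- pv_equiv track=rewrite | github.com/lurumad/katas-1 | hotjar/test_int_array_1_3_4_sequence_detector.py | contains_sequence_1_3_4
-- ===== SOURCE A (Python) =====
-- def contains_sequence_1_3_4(numbers):
--     searched_sequence = [1, 3, 4]
--     searched_sequence_length = len(searched_sequence)
--     input_length = len(numbers)
--     if input_length < searched_sequence_length:
--         return False
--     for index in range(input_length - searched_sequence_length + 1):
--         if (numbers[index] == searched_sequence[0] and
--             numbers[index + 1] == searched_sequence[1] and
--             numbers[index + 2] == searched_sequence[2]):
--             return True
--     return False
-- ===== SOURCE B (Python) =====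
-- def contains_sequence_1_3_4(numbers):
--     pattern = [1, 3, 4]
--     matched = 0
--     for x in numbers:
--         if x == pattern[matched]:
--             if matched == 2:
--                 return True
--             matched += 1
--         elif x == 1:
--             matched = 1
--         else:
--             matched = 0
--     return False
-- ===== Notes on version B (the rewrite author's own statement) =====
-- stated objective: alternative
-- what changed: Replaced the explicit 3-wide window check at every index with a single streaming pass that maintains match-progress state (a tiny KMP-style automaton) with correct restart on a mid-match '1'.
import Mathlib
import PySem

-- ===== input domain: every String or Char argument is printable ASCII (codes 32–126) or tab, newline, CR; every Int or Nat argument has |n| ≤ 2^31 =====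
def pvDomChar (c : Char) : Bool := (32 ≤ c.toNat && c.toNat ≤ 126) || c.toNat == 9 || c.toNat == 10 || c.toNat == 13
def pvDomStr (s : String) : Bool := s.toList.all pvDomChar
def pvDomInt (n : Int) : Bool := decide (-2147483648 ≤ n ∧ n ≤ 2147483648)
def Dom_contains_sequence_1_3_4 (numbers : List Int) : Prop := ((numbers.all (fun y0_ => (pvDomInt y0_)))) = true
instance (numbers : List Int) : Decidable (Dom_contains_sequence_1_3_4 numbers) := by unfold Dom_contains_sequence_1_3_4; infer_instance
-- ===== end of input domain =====

-- B replaces A's explicit 3-wide window scan by a single streaming pass keeping match-progress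
-- state (a small KMP-style automaton); same O(n) cost, different decomposition (objective: alternative).

-- ===== PORT A =====
-- A scans every window start index and checks the three positions against the pattern.
def contains_sequence_1_3_4 (numbers : List Int) : Bool :=
  let searched_sequence : List Int := [1, 3, 4]
  let searched_sequence_length : Int := searched_sequence.length
  let input_length : Int := numbers.length
  if input_length < searched_sequence_length then false
  else
    (PySem.List.pyRange 0 (input_length - searched_sequence_length + 1) 1).any (fun index =>
      (PySem.List.pyGet? numbers index == PySem.List.pyGet? searched_sequence 0) &&
      (PySem.List.pyGet? numbers (index + 1) == PySem.List.pyGet? searched_sequence 1) &&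
      (PySem.List.pyGet? numbers (index + 2) == PySem.List.pyGet? searched_sequence 2))

-- ===== PORT B =====
-- the streaming loop of Source B: `matched` is the number of pattern elements matched so far
def cs134Loop : List Int → Int → Bool
  | [], _ => false
  | x :: rest, matched =>
    if PySem.List.pyGet? [1, 3, 4] matched == some x then
      if matched == 2 then true else cs134Loop rest (matched + 1)
    else if x == 1 then cs134Loop rest 1
    else cs134Loop rest 0

def contains_sequence_1_3_4_alt (numbers : List Int) : Bool :=
  cs134Loop numbers 0

-- ===== PRECONDITION & SPEC =====
def Spec_contains_sequence_1_3_4 (numbers : List Int) (out : Bool) : Prop := out = contains_sequence_1_3_4_alt numbers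
instance (numbers : List Int) (out : Bool) : Decidable (Spec_contains_sequence_1_3_4 numbers out) := by unfold Spec_contains_sequence_1_3_4; infer_instance

-- ===== CLAIM (what is proved, stated in full; the proofs are below) =====
def Claim_equal_contains_sequence_1_3_4 : Prop := ∀ (numbers : List Int), Dom_contains_sequence_1_3_4 numbers → Spec_contains_sequence_1_3_4 numbers (contains_sequence_1_3_4 numbers)

-- ===== LEMMAS AND PROOFS =====

-- reference predicate both ports are reduced to: "some window of l is [1,3,4]"
def win : List Int → Bool
  | a :: b :: c :: rest => if a = 1 ∧ b = 3 ∧ c = 4 then true else win (b :: c :: rest)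
  | _ => false

lemma win_cons_ne {x : Int} (l : List Int) (hx : x ≠ 1) : win (x :: l) = win l := by
  match l with
  | [] => simp [win]
  | [b] => simp [win]
  | b :: c :: t => simp [win, hx]

lemma win_cons2_ne {x : Int} (l : List Int) (hx : x ≠ 3) : win (1 :: x :: l) = win (x :: l) := by
  match l with
  | [] => simp [win]
  | c :: t => simp [win, hx]

-- pyGet? of the literal pattern list, evaluated
lemma pgL0 : PySem.List.pyGet? ([1, 3, 4] : List Int) 0 = some 1 := by decide
lemma pgL1 : PySem.List.pyGet? ([1, 3, 4] : List Int) 1 = some 3 := by decide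
lemma pgL2 : PySem.List.pyGet? ([1, 3, 4] : List Int) 2 = some 4 := by decide

-- pyGet? at the small nonnegative indices A's window uses
lemma pgC0 (x : Int) (t : List Int) : PySem.List.pyGet? (x :: t) 0 = some x := by
  rw [(by norm_num : (0 : Int) = ((0 : ℕ) : Int)), PySem.List.pyGet?_natCast]; simp
lemma pgC1 (x a : Int) (t : List Int) : PySem.List.pyGet? (x :: a :: t) 1 = some a := by
  rw [(by norm_num : (1 : Int) = ((1 : ℕ) : Int)), PySem.List.pyGet?_natCast]; simp
lemma pgC2 (x a b : Int) (t : List Int) : PySem.List.pyGet? (x :: a :: b :: t) 2 = some b := by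
  rw [(by norm_num : (2 : Int) = ((2 : ℕ) : Int)), PySem.List.pyGet?_natCast]; simp

-- the single window test A performs at index i, as a function of the list
def chk (l : List Int) (i : Int) : Bool :=
  (PySem.List.pyGet? l i == some 1) &&
  (PySem.List.pyGet? l (i + 1) == some 3) &&
  (PySem.List.pyGet? l (i + 2) == some 4)

lemma chk_shift (x : Int) (l : List Int) (j : ℕ) :
    chk (x :: l) ((j : Int) + 1) = chk l j := by
  have e4 : (j : Int) + 1 + 2 = ((j + 3 : ℕ) : Int) := by push_cast; ring
  have e2 : (j : Int) + 1 + 1 = ((j + 2 : ℕ) : Int) := by push_cast; ring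
  have e3 : (j : Int) + 2 = ((j + 2 : ℕ) : Int) := by push_cast; ring
  have e1 : (j : Int) + 1 = ((j + 1 : ℕ) : Int) := by push_cast; ring
  simp only [chk]
  rw [e4, e2, e3, e1]
  simp only [PySem.List.pyGet?_natCast]
  rfl

lemma chk_zero (x a b : Int) (t : List Int) :
    chk (x :: a :: b :: t) 0 = (x == 1 && a == 3 && b == 4) := by
  simp only [chk, zero_add, pgC0, pgC1, pgC2]
  rfl

lemma arange_eq_win : ∀ l : List Int,
    (List.range (l.length - 2)).any (fun j => chk l (j : Int)) = win l := by
  intro l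
  induction l with
  | nil => simp [win]
  | cons x rest ih =>
    match rest, ih with
    | [], _ => simp [win]
    | [a], _ => simp [win]
    | a :: b :: t, ih =>
      have hlen : (x :: a :: b :: t).length - 2 = ((a :: b :: t).length - 2) + 1 := by
        simp only [List.length_cons]; omega
      rw [hlen, List.range_succ_eq_map, List.any_cons, List.any_map]
      have hshift : (fun (j : ℕ) => chk (x :: a :: b :: t) (j : Int)) ∘ Nat.succ
          = fun (j : ℕ) => chk (a :: b :: t) (j : Int) := by
        funext j
        simp only [Function.comp, Nat.succ_eq_add_one]
        rw [show ((j + 1 : ℕ) : Int) = (j : Int) + 1 from by push_cast; ring, chk_shift]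
      rw [hshift, ih]
      simp only [Nat.cast_zero, chk_zero]
      by_cases h : x = 1 ∧ a = 3 ∧ b = 4
      · obtain ⟨h1, h2, h3⟩ := h
        simp [win, h1, h2, h3]
      · have hwin : win (x :: a :: b :: t) = win (a :: b :: t) := by simp [win, h]
        rw [hwin]
        simp only [not_and_or] at h
        rcases h with h | h | h <;> simp [h]

lemma A_eq_win (l : List Int) : contains_sequence_1_3_4 l = win l := by
  unfold contains_sequence_1_3_4
  by_cases h : (l.length : Int) < 3
  · have h3 : l.length < 3 := by exact_mod_cast h
    rw [if_pos (by simpa using h)]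
    match l, h3 with
    | [], _ => simp [win]
    | [a], _ => simp [win]
    | [a, b], _ => simp [win]
  · rw [if_neg (by simpa using h)]
    have hlen : 3 ≤ l.length := by omega
    have hcast : (l.length : Int) - (([1, 3, 4] : List Int).length : Int) + 1
        = ((l.length - 2 : ℕ) : Int) := by
      simp only [List.length_cons, List.length_nil]; push_cast; omega
    rw [hcast, PySem.List.pyRange_zero_natCast, List.any_map]
    rw [← arange_eq_win l]
    have hfun : (fun index =>
        (PySem.List.pyGet? l index == PySem.List.pyGet? ([1, 3, 4] : List Int) 0) &&
        (PySem.List.pyGet? l (index + 1) == PySem.List.pyGet? ([1, 3, 4] : List Int) 1) &&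
        (PySem.List.pyGet? l (index + 2) == PySem.List.pyGet? ([1, 3, 4] : List Int) 2)) ∘
          (Nat.cast : ℕ → Int)
        = fun (j : ℕ) => chk l (j : Int) := by
      funext j
      simp only [Function.comp, chk, pgL0, pgL1, pgL2]
    rw [hfun]

lemma loop_eq_win : ∀ l : List Int,
    cs134Loop l 0 = win l ∧ cs134Loop l 1 = win (1 :: l) ∧ cs134Loop l 2 = win (1 :: 3 :: l) := by
  intro l
  induction l with
  | nil => refine ⟨rfl, ?_, ?_⟩ <;> simp [win, cs134Loop]
  | cons x rest ih =>
    obtain ⟨ih0, ih1, ih2⟩ := ih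
    refine ⟨?_, ?_, ?_⟩
    · -- state 0
      by_cases hx : x = 1
      · simp [cs134Loop, hx, ih1]
      · simp [cs134Loop, hx, ih0, win_cons_ne rest hx,
          show ¬(1 : Int) = x from fun h => hx h.symm]
    · -- state 1
      by_cases hx : x = 3
      · simp [cs134Loop, hx, ih2]
      · by_cases hx1 : x = 1
        · simp [cs134Loop, hx1, ih1,
            win_cons2_ne rest (show (1 : Int) ≠ 3 from by norm_num)]
        · simp [cs134Loop, hx1, ih0, win_cons2_ne rest hx, win_cons_ne rest hx1,
            show ¬(3 : Int) = x from fun h => hx h.symm]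
    · -- state 2
      by_cases hx : x = 4
      · simp [cs134Loop, hx, win]
      · have hrw : win (1 :: 3 :: x :: rest) = win (x :: rest) := by
          rw [show win (1 :: 3 :: x :: rest) = win (3 :: x :: rest) from by simp [win, hx],
            win_cons_ne (x :: rest) (by norm_num)]
        by_cases hx1 : x = 1
        · have h131 : win (1 :: 3 :: 1 :: rest) = win (1 :: rest) := by
            rw [show win (1 :: 3 :: 1 :: rest) = win (3 :: 1 :: rest) from by simp [win],
              win_cons_ne (1 :: rest) (show (3 : Int) ≠ 1 from by norm_num)]
          simp [cs134Loop, hx1, ih1, h131]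
        · simp [cs134Loop, hx1, ih0, hrw, win_cons_ne rest hx1,
            show ¬(4 : Int) = x from fun h => hx h.symm]

-- ===== VERDICT (by name: the statement is the Claim_ definition above) =====
theorem contains_sequence_1_3_4_spec : Claim_equal_contains_sequence_1_3_4 := by
  intro numbers _
  unfold Spec_contains_sequence_1_3_4 contains_sequence_1_3_4_alt
  rw [A_eq_win, (loop_eq_win numbers).1]
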